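-- pv_equiv track=rewrite | github.com/susahin97/td-squential | app.py | check_recycling
-- ===== SOURCE A (Python) =====
-- def check_recycling(countdown_vals, setups):
--     recycled = [False] * len(countdown_vals)
--     for i in range(len(countdown_vals)):
--         if countdown_vals[i] == 13:
--             for j in range(i, i-22, -1):
--                 if j >= 0 and setups[j] >= 9:
--                     recycled[i] = True
--                     break
--     return recycled
-- ===== SOURCE B (Python) =====
-- def check_recycling(countdown_vals, setups):
--     m = len(setups)
--     last = None  # most recent index k with setups[k] >= 9, or None
--     out = []
--     for i in range(len(countdown_vals)):
--         if i < m and setups[i] >= 9: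
--             last = i
--         out.append(countdown_vals[i] == 13 and last is not None and i - last <= 21)
--     return out
-- ===== Notes on version B (the rewrite author's own statement) =====
-- stated objective: alternative
-- what changed: Replaces the inner 22-element backward window scan at every 13-countdown by a single forward pass that maintains `last`, the most recent index with setup >= 9, testing i - last <= 21; it trades the repeated window scan for one maintained pointer and an output list built left to right.
import Mathlib
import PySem

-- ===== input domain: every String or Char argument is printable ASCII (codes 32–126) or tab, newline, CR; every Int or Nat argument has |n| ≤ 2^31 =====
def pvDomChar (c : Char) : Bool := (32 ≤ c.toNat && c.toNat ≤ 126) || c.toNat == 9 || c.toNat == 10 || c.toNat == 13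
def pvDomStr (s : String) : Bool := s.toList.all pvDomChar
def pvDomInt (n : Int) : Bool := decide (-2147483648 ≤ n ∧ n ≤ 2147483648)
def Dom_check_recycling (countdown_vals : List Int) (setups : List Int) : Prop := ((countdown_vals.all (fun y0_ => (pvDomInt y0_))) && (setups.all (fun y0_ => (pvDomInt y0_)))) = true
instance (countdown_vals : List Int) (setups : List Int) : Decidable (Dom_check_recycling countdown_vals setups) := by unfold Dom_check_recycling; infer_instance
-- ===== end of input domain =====

-- B replaces A's inner 22-wide backward window scan by one forward pass maintaining the
-- most recent setup>=9 index (objective: alternative single-pass algorithm).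


-- ===== PORT A =====
-- for i in range(n): if cv[i]==13: for j in range(i, i-22, -1): if j>=0 and setups[j]>=9: True; break
def check_recycling (countdown_vals : List Int) (setups : List Int) : List Bool :=
  (List.range countdown_vals.length).map (fun i =>
    if countdown_vals.getD i 0 = 13 then
      (PySem.List.pyRange (i : Int) ((i : Int) - 22) (-1)).any
        (fun j => decide (0 ≤ j) && decide (9 ≤ PySem.List.pyGetD setups j 0))
    else false)

-- ===== PORT B =====
-- loop body of B: update `last`, then append the flag for index i
def altStep (countdown_vals : List Int) (setups : List Int)
    (st : Option Nat × List Bool) (i : Nat) : Option Nat × List Bool :=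
  let last := if i < setups.length ∧ 9 ≤ setups.getD i 0 then some i else st.1
  (last, st.2 ++ [decide (countdown_vals.getD i 0 = 13) &&
    (match last with
     | none => false
     | some l => decide ((i : Int) - (l : Int) ≤ 21))])

def check_recycling_alt (countdown_vals : List Int) (setups : List Int) : List Bool :=
  ((List.range countdown_vals.length).foldl (altStep countdown_vals setups) (none, [])).2

-- ===== PRECONDITION & SPEC =====
-- Pre_ excludes exactly the inputs on which A raises IndexError: a 13-countdown at an
-- index i with no setups[i] (i >= len(setups)); everywhere else A returns normally.
def Pre_check_recycling (countdown_vals : List Int) (setups : List Int) : Prop :=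
  ∀ i < countdown_vals.length, countdown_vals.getD i 0 = 13 → i < setups.length
instance (countdown_vals : List Int) (setups : List Int) : Decidable (Pre_check_recycling countdown_vals setups) := by unfold Pre_check_recycling; infer_instance

def pvWitness_check_recycling : List Int × List Int := ([13, 0, 13], [9, 0, 3])

def Spec_check_recycling (countdown_vals : List Int) (setups : List Int) (out : List Bool) : Prop := out = check_recycling_alt countdown_vals setups
instance (countdown_vals : List Int) (setups : List Int) (out : List Bool) : Decidable (Spec_check_recycling countdown_vals setups out) := by unfold Spec_check_recycling; infer_instance

-- ===== CLAIM (what is proved, stated in full; the proofs are below) =====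
def Claim_equal_check_recycling : Prop := ∀ (countdown_vals : List Int) (setups : List Int), Dom_check_recycling countdown_vals setups → Pre_check_recycling countdown_vals setups → Spec_check_recycling countdown_vals setups (check_recycling countdown_vals setups)

-- ===== LEMMAS AND PROOFS =====

-- the value of B's `last` after processing indices 0..k-1
def lastHit (s : List Int) : Nat → Option Nat
  | 0 => none
  | k + 1 => if k < s.length ∧ 9 ≤ s.getD k 0 then some k else lastHit s k

-- the flag B emits at index i
def bBit (cv s : List Int) (i : Nat) : Bool :=
  decide (cv.getD i 0 = 13) &&
    (match lastHit s (i + 1) with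
     | none => false
     | some l => decide ((i : Int) - (l : Int) ≤ 21))

lemma altStep_run (cv s : List Int) (k : Nat) (acc : List Bool) :
    altStep cv s (lastHit s k, acc) k = (lastHit s (k + 1), acc ++ [bBit cv s k]) := by
  simp [altStep, bBit, lastHit]

lemma alt_loop (cv s : List Int) : ∀ (cnt k : Nat) (acc : List Bool),
    (List.range' k cnt).foldl (altStep cv s) (lastHit s k, acc) =
      (lastHit s (k + cnt), acc ++ (List.range' k cnt).map (bBit cv s)) := by
  intro cnt
  induction cnt with
  | zero => intro k acc; simp
  | succ n ih =>
      intro k acc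
      rw [List.range'_succ]
      simp only [List.foldl_cons, altStep_run, List.map_cons]
      rw [ih (k + 1) (acc ++ [bBit cv s k]),
        show k + 1 + n = k + (n + 1) from by omega]
      simp

lemma alt_eq_map (cv s : List Int) :
    check_recycling_alt cv s = (List.range cv.length).map (bBit cv s) := by
  have h := alt_loop cv s cv.length 0 []
  simp only [lastHit] at h
  rw [check_recycling_alt, List.range_eq_range', h]
  simp

lemma lastHit_some (s : List Int) : ∀ k l, lastHit s k = some l →
    l < k ∧ l < s.length ∧ 9 ≤ s.getD l 0 := by
  intro k
  induction k with
  | zero => intro l h; simp [lastHit] at h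
  | succ n ih =>
      intro l h
      simp only [lastHit] at h
      split at h
      · next hc => cases h; exact ⟨Nat.lt_succ_self _, hc⟩
      · rcases ih l h with ⟨h1, h2, h3⟩; exact ⟨Nat.lt_succ_of_lt h1, h2, h3⟩

lemma lastHit_max (s : List Int) : ∀ k l, lastHit s k = some l →
    ∀ j, l < j → j < k → ¬(j < s.length ∧ 9 ≤ s.getD j 0) := by
  intro k
  induction k with
  | zero => intro l h; simp [lastHit] at h
  | succ n ih =>
      intro l h j hlj hjk
      simp only [lastHit] at h
      split at h
      · next hc =>
          cases h
          omega
      · next hc =>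
          rcases Nat.lt_succ_iff_lt_or_eq.mp hjk with hj | hj
          · exact ih l h j hlj hj
          · subst hj; exact hc

lemma lastHit_none (s : List Int) : ∀ k, lastHit s k = none →
    ∀ j < k, ¬(j < s.length ∧ 9 ≤ s.getD j 0) := by
  intro k
  induction k with
  | zero => intro _ j hj; omega
  | succ n ih =>
      intro h j hj
      simp only [lastHit] at h
      split at h
      · simp at h
      · next hc =>
          rcases Nat.lt_succ_iff_lt_or_eq.mp hj with hj' | hj'
          · exact ih h j hj'
          · subst hj'; exact hc

lemma getD_big (s : List Int) (j : Nat) (h : 9 ≤ s.getD j 0) : j < s.length := by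
  by_contra hj
  rw [List.getD_eq_default] at h
  · omega
  · omega

lemma bit_eq (cv s : List Int) (i : Nat) :
    (if cv.getD i 0 = 13 then
      (PySem.List.pyRange (i : Int) ((i : Int) - 22) (-1)).any
        (fun j => decide (0 ≤ j) && decide (9 ≤ PySem.List.pyGetD s j 0))
     else false) = bBit cv s i := by
  by_cases h13 : cv.getD i 0 = 13
  · simp only [h13, if_pos, bBit, decide_true, Bool.true_and]
    have hany : ((PySem.List.pyRange (i : Int) ((i : Int) - 22) (-1)).any
        (fun j => decide (0 ≤ j) && decide (9 ≤ PySem.List.pyGetD s j 0)) = true) ↔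
        ∃ jn : Nat, jn < i + 1 ∧ (i : Int) - (jn : Int) ≤ 21 ∧ jn < s.length ∧ 9 ≤ s.getD jn 0 := by
      rw [List.any_eq_true]
      constructor
      · rintro ⟨j, hmem, hp⟩
        rw [PySem.List.mem_pyRange_neg_one] at hmem
        simp only [Bool.and_eq_true, decide_eq_true_eq] at hp
        obtain ⟨hj0, hjv⟩ := hp
        refine ⟨j.toNat, by omega, by omega, ?_, ?_⟩
        · apply getD_big s j.toNat
          rwa [PySem.List.pyGetD_of_nonneg s 0 hj0] at hjv
        · rwa [PySem.List.pyGetD_of_nonneg s 0 hj0] at hjv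
      · rintro ⟨jn, hlt, hwin, hm, hv⟩
        refine ⟨(jn : Int), ?_, ?_⟩
        · rw [PySem.List.mem_pyRange_neg_one]; omega
        · simp only [Bool.and_eq_true, decide_eq_true_eq]
          refine ⟨by omega, ?_⟩
          rw [PySem.List.pyGetD_of_nonneg s 0 (by omega : (0:Int) ≤ (jn : Int))]
          simpa using hv
    cases hlh : lastHit s (i + 1) with
    | none =>
        have hfalse : ((PySem.List.pyRange (i : Int) ((i : Int) - 22) (-1)).any
            (fun j => decide (0 ≤ j) && decide (9 ≤ PySem.List.pyGetD s j 0))) = false := by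
          rw [Bool.eq_false_iff]
          intro hc
          rcases hany.mp hc with ⟨jn, hlt, _, hm, hv⟩
          exact lastHit_none s _ hlh jn hlt ⟨hm, hv⟩
        rw [hfalse]
    | some l =>
        simp only
        rcases lastHit_some s _ _ hlh with ⟨hl1, hl2, hl3⟩
        by_cases hw : (i : Int) - (l : Int) ≤ 21
        · rw [hany.mpr ⟨l, hl1, hw, hl2, hl3⟩]
          simp [hw]
        · have : ((PySem.List.pyRange (i : Int) ((i : Int) - 22) (-1)).any
            (fun j => decide (0 ≤ j) && decide (9 ≤ PySem.List.pyGetD s j 0))) = false := by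
            rw [Bool.eq_false_iff]
            intro hc
            rcases hany.mp hc with ⟨jn, hlt, hwin, hm, hv⟩
            by_cases hcmp : l < jn
            · exact lastHit_max s _ _ hlh jn hcmp hlt ⟨hm, hv⟩
            · omega
          rw [this]
          simp [hw]
  · rw [if_neg h13]
    simp only [bBit]
    rw [decide_eq_false h13, Bool.false_and]

-- ===== VERDICT (by name: the statement is the Claim_ definition above) =====
theorem check_recycling_spec : Claim_equal_check_recycling := by
  intro cv s _ _
  unfold Spec_check_recycling
  rw [alt_eq_map, check_recycling]
  exact List.map_congr_left (fun i _ => bit_eq cv s i)
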